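-- pv_equiv track=rewrite | github.com/filipspych/kos-rna-design | convert_representation.py | convert_parenthesized_to_numberized
-- ===== SOURCE A (Python) =====
-- def convert_parenthesized_to_numberized(parenthesized: str) -> str:
--     """
--     Zamiast kropek wstawia liczby, które oznaczają ile kropek jest w grupie.
--     """
--     count = 0
--     result = ""
--     for char in parenthesized:
--         if char == '.':
--             count += 1
--         else:
--             if count > 0:
--                 result += str(count)
--                 count = 0
--             result += char
--     if count > 0:
--         result += str(count)
--     return result
-- ===== SOURCE B (Python) =====
-- import re
--
-- def convert_parenthesized_to_numberized(parenthesized: str) -> str: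
--     return re.sub(r'\.+', lambda m: str(len(m.group(0))), parenthesized)
-- ===== Notes on version B (the rewrite author's own statement) =====
-- stated objective: idiomatic
-- what changed: Replaced the explicit character loop with a count accumulator and flush logic by a single regex substitution that replaces each maximal run of dots with its length.
import Mathlib
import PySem

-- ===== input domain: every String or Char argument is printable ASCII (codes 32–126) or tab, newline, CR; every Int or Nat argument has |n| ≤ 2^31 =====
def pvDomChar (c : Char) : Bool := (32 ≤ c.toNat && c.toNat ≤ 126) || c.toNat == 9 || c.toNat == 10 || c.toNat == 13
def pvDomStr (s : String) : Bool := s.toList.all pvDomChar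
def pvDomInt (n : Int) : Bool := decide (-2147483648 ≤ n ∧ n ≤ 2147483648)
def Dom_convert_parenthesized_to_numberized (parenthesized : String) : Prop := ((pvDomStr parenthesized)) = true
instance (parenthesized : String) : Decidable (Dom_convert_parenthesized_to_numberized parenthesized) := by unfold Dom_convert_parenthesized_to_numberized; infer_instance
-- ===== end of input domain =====

-- B replaces A's explicit counting loop by one regex substitution of each maximal dot run with its length (idiomatic; same cost).

-- ===== PORT A =====
-- one loop step: ('.': bump count; else: flush pending count then emit char)
def pvStepA (st : Int × List Char) (c : Char) : Int × List Char :=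
  if c = '.' then (st.1 + 1, st.2)
  else if st.1 > 0 then (0, (st.2 ++ PySem.Int.toChars st.1) ++ [c])
  else (0, st.2 ++ [c])

def convert_parenthesized_to_numberized (parenthesized : String) : String :=
  let st := parenthesized.toList.foldl pvStepA (0, [])
  String.mk (if st.1 > 0 then st.2 ++ PySem.Int.toChars st.1 else st.2)

-- ===== PORT B =====
-- port of re.sub(r'\.+', …): scan for a maximal run of dots, replace it by str(its length)
def pvSubDots : List Char → List Char
  | [] => []
  | c :: cs =>
    if c = '.' then
      PySem.Int.toChars ((1 : Int) + (cs.takeWhile (· = '.')).length)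
        ++ pvSubDots (cs.dropWhile (· = '.'))
    else c :: pvSubDots cs
termination_by cs => cs.length
decreasing_by
  · exact Nat.lt_succ_of_le (List.length_dropWhile_le _ _)
  · simp

def convert_parenthesized_to_numberized_alt (parenthesized : String) : String :=
  String.mk (pvSubDots parenthesized.toList)

-- ===== PRECONDITION & SPEC =====
def Spec_convert_parenthesized_to_numberized (parenthesized : String) (out : String) : Prop := out = convert_parenthesized_to_numberized_alt parenthesized
instance (parenthesized : String) (out : String) : Decidable (Spec_convert_parenthesized_to_numberized parenthesized out) := by unfold Spec_convert_parenthesized_to_numberized; infer_instance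

-- ===== CLAIM (what is proved, stated in full; the proofs are below) =====
def Claim_equal_convert_parenthesized_to_numberized : Prop := ∀ (parenthesized : String), Dom_convert_parenthesized_to_numberized parenthesized → Spec_convert_parenthesized_to_numberized parenthesized (convert_parenthesized_to_numberized parenthesized)

-- ===== LEMMAS AND PROOFS =====

-- result accumulator of A's fold factors out
theorem pvFoldA_factor (cs : List Char) (k : Int) (r : List Char) :
    cs.foldl pvStepA (k, r) = ((cs.foldl pvStepA (k, [])).1, r ++ (cs.foldl pvStepA (k, [])).2) := by
  induction cs generalizing k r with
  | nil => simp
  | cons c cs ih =>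
    simp only [List.foldl_cons, pvStepA]
    split_ifs with h1 h2
    · exact ih _ _
    · rw [ih _ (([] ++ PySem.Int.toChars k) ++ [c]), ih _ ((r ++ PySem.Int.toChars k) ++ [c])]
      simp
    · rw [ih _ ([] ++ [c]), ih _ (r ++ [c])]
      simp

-- A's output when processing cs with pending count k
def pvAFrom (k : Int) (cs : List Char) : List Char :=
  let st := cs.foldl pvStepA (k, [])
  if st.1 > 0 then st.2 ++ PySem.Int.toChars st.1 else st.2

theorem pvAFrom_main : (cs : List Char) →
    pvAFrom 0 cs = pvSubDots cs ∧
    ∀ k : Int, 0 < k →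
      pvAFrom k cs = PySem.Int.toChars (k + (cs.takeWhile (· = '.')).length)
        ++ pvSubDots (cs.dropWhile (· = '.')) := by
  intro cs
  have ih : ∀ ds : List Char, ds.length < cs.length →
      pvAFrom 0 ds = pvSubDots ds ∧
      ∀ k : Int, 0 < k →
        pvAFrom k ds = PySem.Int.toChars (k + (ds.takeWhile (· = '.')).length)
          ++ pvSubDots (ds.dropWhile (· = '.')) :=
    fun ds _ => pvAFrom_main ds
  match cs with
  | [] =>
    constructor
    · simp [pvAFrom, pvSubDots]
    · intro k hk
      simp [pvAFrom, pvSubDots, hk]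
  | c :: cs =>
    have ihcs := ih cs (by simp)
    by_cases hc : c = '.'
    · subst hc
      have hdrop := ih (cs.dropWhile (· = '.'))
        (Nat.lt_succ_of_le (List.length_dropWhile_le _ _))
      constructor
      · have h1 := ihcs.2 1 one_pos
        simp only [pvAFrom, List.foldl_cons, pvStepA, reduceIte] at h1 ⊢
        rw [zero_add, h1]
        simp [pvSubDots]
      · intro k hk
        have h1 := ihcs.2 (k + 1) (by omega)
        simp only [pvAFrom, List.foldl_cons, pvStepA, reduceIte] at h1 ⊢
        rw [h1]
        have : (List.takeWhile (· = '.') ('.' :: cs)).length = (List.takeWhile (· = '.') cs).length + 1 := by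
          simp [List.takeWhile]
        rw [List.dropWhile_cons_of_pos (by simp), this]
        push_cast
        ring_nf
    · constructor
      · simp only [pvAFrom, List.foldl_cons, pvStepA, if_neg hc]
        norm_num
        rw [pvFoldA_factor cs 0 [c]]
        have h0 := ihcs.1
        simp only [pvAFrom] at h0
        rw [pvSubDots, if_neg hc, ← h0]
        split <;> simp
      · intro k hk
        simp only [pvAFrom, List.foldl_cons, pvStepA, if_neg hc, if_pos hk]
        rw [pvFoldA_factor cs 0 (([] ++ PySem.Int.toChars k) ++ [c])]
        have h0 := ihcs.1
        simp only [pvAFrom] at h0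
        rw [List.takeWhile_cons_of_neg (by simp [hc]), List.dropWhile_cons_of_neg (by simp [hc])]
        rw [pvSubDots, if_neg hc, ← h0]
        split <;> simp
termination_by cs => cs.length

-- ===== VERDICT (by name: the statement is the Claim_ definition above) =====
theorem convert_parenthesized_to_numberized_spec : Claim_equal_convert_parenthesized_to_numberized := by
  intro p _
  have h := (pvAFrom_main p.toList).1
  simp only [pvAFrom] at h
  show String.mk (if (p.toList.foldl pvStepA (0, [])).1 > 0
      then (p.toList.foldl pvStepA (0, [])).2 ++ PySem.Int.toChars (p.toList.foldl pvStepA (0, [])).1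
      else (p.toList.foldl pvStepA (0, [])).2) = String.mk (pvSubDots p.toList)
  rw [h]
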